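-- pv_equiv track=rewrite | github.com/datawhalechina/huawei-od-python | codes/addition100/002_complete-binary-tree-non-leaf-parts-post-order-traversal.py | post_order_non_leaf
-- ===== SOURCE A (Python) =====
-- def post_order_non_leaf(ints, index):
--     """后序遍历完全二叉树并返回非叶子节点的索引。"""
--
--     # 如果索引超出列表范围，返回空列表
--     if index >= len(ints):
--         return []
--
--     # 计算左右子节点的索引
--     left_child = 2 * index + 1
--     right_child = 2 * index + 2
--
--     # 后序遍历：先左子树，再右子树，最后根节点
--     left_result = post_order_non_leaf(ints, left_child)
--     right_result = post_order_non_leaf(ints, right_child)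
--
--     # 如果当前节点是非叶子节点，添加到结果中
--     if left_child < len(ints) or right_child < len(ints):
--         return left_result + right_result + [index]
--     return []
-- ===== SOURCE B (Python) =====
-- def post_order_non_leaf(ints, index):
--     """Iterative post-order via reversed modified-preorder with an explicit stack."""
--     n = len(ints)
--     if index >= n:
--         return []
--     stack = [index]
--     temp = []
--     while stack:
--         i = stack.pop()
--         if 2 * i + 1 < n:          # non-leaf: record it, descend
--             temp.append(i)
--             stack.append(2 * i + 1)
--             if 2 * i + 2 < n:
--                 stack.append(2 * i + 2)
--     temp.reverse()
--     return temp
-- ===== Notes on version B (the rewrite author's own statement) =====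
-- stated objective: alternative
-- what changed: Replaces A's recursive post-order with an iterative explicit-stack traversal (reversed modified preorder: node, right, left) that visits only in-range nodes and reverses the collected list at the end; Pre_ excludes negative indices, on which A raises RecursionError.
import Mathlib
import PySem

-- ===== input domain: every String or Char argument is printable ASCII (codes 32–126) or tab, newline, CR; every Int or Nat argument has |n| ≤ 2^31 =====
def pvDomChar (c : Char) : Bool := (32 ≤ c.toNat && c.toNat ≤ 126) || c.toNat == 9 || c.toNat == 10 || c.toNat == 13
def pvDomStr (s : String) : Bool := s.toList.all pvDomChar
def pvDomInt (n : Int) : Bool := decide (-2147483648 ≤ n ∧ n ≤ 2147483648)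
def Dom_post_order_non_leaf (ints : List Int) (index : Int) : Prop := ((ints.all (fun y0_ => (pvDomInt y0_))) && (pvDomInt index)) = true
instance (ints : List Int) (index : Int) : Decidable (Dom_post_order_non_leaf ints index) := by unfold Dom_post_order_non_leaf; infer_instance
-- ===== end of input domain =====

-- B replaces A's recursion by an iterative explicit-stack traversal (reversed modified
-- preorder), a different decomposition of the same O(n) task.

-- ===== PORT A =====
-- A's recursion diverges for index < 0 (Python RecursionError); the fuel parameter only
-- makes it total in Lean: fuel n+1 provably suffices on 0 ≤ index (depth ≤ n - index + 1).
def pAux (n : Nat) (fuel : Nat) (index : Int) : List Int :=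
  match fuel with
  | 0 => []
  | f + 1 =>
    if (n : Int) ≤ index then []
    else
      let left_child := 2 * index + 1
      let right_child := 2 * index + 2
      let left_result := pAux n f left_child
      let right_result := pAux n f right_child
      if left_child < (n : Int) ∨ right_child < (n : Int) then
        left_result ++ right_result ++ [index]
      else []

def post_order_non_leaf (ints : List Int) (index : Int) : List Int :=
  pAux ints.length (ints.length + 1) index

-- ===== PORT B =====
-- fuel guard for the Python `while stack:` loop (the loop pops exactly the nodes of the
-- subtree, so `sz` — the subtree node count — is exactly enough fuel on 0 ≤ index;
-- Python B loops forever on negative index, which Pre_ excludes).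
def sz (n : Nat) (i : Nat) : Nat :=
  if i < n then 1 + sz n (2 * i + 1) + sz n (2 * i + 2) else 0
termination_by n - i
decreasing_by all_goals omega

def bLoop (n : Nat) : Nat → List Int → List Int → List Int
  | 0, _, temp => temp.reverse
  | _ + 1, [], temp => temp.reverse
  | f + 1, i :: rest, temp =>
    if 2 * i + 1 < (n : Int) then
      let temp' := temp ++ [i]
      let s1 := (2 * i + 1) :: rest
      let s2 := if 2 * i + 2 < (n : Int) then (2 * i + 2) :: s1 else s1
      bLoop n f s2 temp'
    else
      bLoop n f rest temp

def post_order_non_leaf_alt (ints : List Int) (index : Int) : List Int :=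
  let n := ints.length
  if (n : Int) ≤ index then []
  else bLoop n (sz n index.toNat) [index] []

-- ===== PRECONDITION & SPEC =====
-- Pre_ excludes index < 0, on which Python A raises RecursionError (and Python B loops);
-- on every other input A returns normally.
def Pre_post_order_non_leaf (ints : List Int) (index : Int) : Prop := 0 ≤ index
instance (ints : List Int) (index : Int) : Decidable (Pre_post_order_non_leaf ints index) := by
  unfold Pre_post_order_non_leaf; infer_instance

def pvWitness_post_order_non_leaf : List Int × Int := ([1, 2, 3, 4, 5, 6, 7], 0)

def Spec_post_order_non_leaf (ints : List Int) (index : Int) (out : List Int) : Prop := out = post_order_non_leaf_alt ints index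
instance (ints : List Int) (index : Int) (out : List Int) : Decidable (Spec_post_order_non_leaf ints index out) := by unfold Spec_post_order_non_leaf; infer_instance

-- ===== CLAIM (what is proved, stated in full; the proofs are below) =====
def Claim_equal_post_order_non_leaf : Prop := ∀ (ints : List Int) (index : Int), Dom_post_order_non_leaf ints index → Pre_post_order_non_leaf ints index → Spec_post_order_non_leaf ints index (post_order_non_leaf ints index)

-- ===== LEMMAS AND PROOFS =====

-- canonical post-order of non-leaf nodes of the subtree at Nat index i
def postSpec (n : Nat) (i : Nat) : List Int :=
  if i < n then
    if 2 * i + 1 < n then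
      postSpec n (2 * i + 1) ++ postSpec n (2 * i + 2) ++ [(i : Int)]
    else []
  else []
termination_by n - i
decreasing_by all_goals omega

theorem postSpec_of_ge {n i : Nat} (h : n ≤ i) : postSpec n i = [] := by
  rw [postSpec]; simp [Nat.not_lt.mpr h]

theorem sz_eq_zero_iff {n i : Nat} : sz n i = 0 ↔ n ≤ i := by
  rw [sz]; split <;> omega

theorem pAux_eq_postSpec (n : Nat) :
    ∀ (f : Nat) (i : Int), 0 ≤ i → (n : Int) + 1 ≤ i + f →
      pAux n f i = postSpec n i.toNat := by
  intro f
  induction f with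
  | zero =>
    intro i hi hf
    have : n ≤ i.toNat := by omega
    simp [pAux, postSpec_of_ge this]
  | succ f ih =>
    intro i hi hf
    rw [pAux]
    by_cases hni : (n : Int) ≤ i
    · have : n ≤ i.toNat := by omega
      simp [hni, postSpec_of_ge this]
    · rw [Int.not_le] at hni
      have hin : i.toNat < n := by omega
      have hl := ih (2 * i + 1) (by omega) (by omega)
      have hr := ih (2 * i + 2) (by omega) (by omega)
      have h1 : (2 * i + 1).toNat = 2 * i.toNat + 1 := by omega
      have h2 : (2 * i + 2).toNat = 2 * i.toNat + 2 := by omega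
      rw [h1] at hl; rw [h2] at hr
      simp only [if_neg (by omega : ¬ (n : Int) ≤ i)]
      by_cases hc : 2 * i + 1 < (n : Int)
      · have hcn : 2 * i.toNat + 1 < n := by omega
        have : (2 * i + 1 < (n : Int) ∨ 2 * i + 2 < (n : Int)) := Or.inl hc
        rw [postSpec]
        simp only [if_pos hin, if_pos hcn, if_pos this, hl, hr]
        have : ((i.toNat : Int)) = i := by omega
        rw [this]
      · have hcn : ¬ 2 * i.toNat + 1 < n := by omega
        have hor : ¬ (2 * i + 1 < (n : Int) ∨ 2 * i + 2 < (n : Int)) := by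
          rw [not_or]; constructor <;> omega
        rw [postSpec]
        simp [hin, hcn, hor]

theorem bLoop_eq (n : Nat) :
    ∀ (f : Nat) (s t : List Int),
      (∀ i ∈ s, 0 ≤ i ∧ i < (n : Int)) →
      (s.map (fun i => sz n i.toNat)).sum ≤ f →
      bLoop n f s t = (t ++ (s.map (fun i => (postSpec n i.toNat).reverse)).flatten).reverse := by
  intro f
  induction f with
  | zero =>
    intro s t hpos hsum
    match s with
    | [] => simp [bLoop]
    | i :: rest =>
      exfalso
      have hin : i.toNat < n := by have := hpos i (List.mem_cons_self ..); omega
      have h1 : 1 ≤ sz n i.toNat := by rw [sz]; simp only [if_pos hin]; omega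
      simp only [List.map_cons, List.sum_cons] at hsum
      omega
  | succ f ih =>
    intro s t hpos hsum
    match s with
    | [] => simp [bLoop]
    | i :: rest =>
      have hib := hpos i (List.mem_cons_self ..)
      have hi0 : 0 ≤ i := hib.1
      have hin : i.toNat < n := by omega
      have h1 : (2 * i + 1).toNat = 2 * i.toNat + 1 := by omega
      have h2 : (2 * i + 2).toNat = 2 * i.toNat + 2 := by omega
      simp only [List.map_cons, List.sum_cons] at hsum
      rw [bLoop]
      by_cases hc : 2 * i + 1 < (n : Int)
      · have hcn : 2 * i.toNat + 1 < n := by omega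
        have hszi : sz n i.toNat = 1 + sz n (2 * i.toNat + 1) + sz n (2 * i.toNat + 2) := by
          rw [sz]; simp [hin]
        have hspec : postSpec n i.toNat
            = postSpec n (2 * i.toNat + 1) ++ postSpec n (2 * i.toNat + 2) ++ [(i.toNat : Int)] := by
          rw [postSpec]; simp [hin, hcn]
        have hii : ((i.toNat : Int)) = i := by omega
        by_cases hc2 : 2 * i + 2 < (n : Int)
        · have hrec := ih ((2 * i + 2) :: (2 * i + 1) :: rest) (t ++ [i])
            (by intro j hj
                simp only [List.mem_cons] at hj
                rcases hj with h | h | h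
                · omega
                · omega
                · exact hpos j (List.mem_cons_of_mem _ h))
            (by simp only [List.map_cons, List.sum_cons, h1, h2]; omega)
          simp only [if_pos hc, if_pos hc2]
          rw [hrec]
          simp only [List.map_cons, List.flatten_cons, h1, h2, hspec, hii]
          simp
        · have hrec := ih ((2 * i + 1) :: rest) (t ++ [i])
            (by intro j hj
                simp only [List.mem_cons] at hj
                rcases hj with h | h
                · omega
                · exact hpos j (List.mem_cons_of_mem _ h))
            (by simp only [List.map_cons, List.sum_cons, h1]; omega)
          simp only [if_pos hc, if_neg hc2]
          rw [hrec]
          have hr0 : postSpec n (2 * i.toNat + 2) = [] :=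
            postSpec_of_ge (by omega)
          simp only [List.map_cons, List.flatten_cons, h1, hspec, hii, hr0]
          simp
      · -- leaf: contributes nothing, consumes exactly one unit of fuel (sz = 1)
        have hcn : ¬ 2 * i.toNat + 1 < n := by omega
        have hszi : sz n i.toNat = 1 := by
          rw [sz]; simp only [if_pos hin]
          rw [sz_eq_zero_iff.mpr (by omega), sz_eq_zero_iff.mpr (by omega)]
        have hspec0 : postSpec n i.toNat = [] := by
          rw [postSpec]; simp [hin, hcn]
        have hrec := ih rest t
          (fun j hj => hpos j (List.mem_cons_of_mem _ hj))
          (by omega)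
        simp only [if_neg hc]
        rw [hrec]
        simp [hspec0]

-- ===== VERDICT (by name: the statement is the Claim_ definition above) =====
theorem post_order_non_leaf_spec : Claim_equal_post_order_non_leaf := by
  intro ints index _ hpre
  have hi : 0 ≤ index := hpre
  unfold Spec_post_order_non_leaf post_order_non_leaf post_order_non_leaf_alt
  set n := ints.length with hn
  have hA : pAux n (n + 1) index = postSpec n index.toNat :=
    pAux_eq_postSpec n (n + 1) index hi (by omega)
  by_cases hge : (n : Int) ≤ index
  · rw [hA, postSpec_of_ge (by omega)]
    simp [hge]
  · have hB := bLoop_eq n (sz n index.toNat) [index] []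
      (by intro j hj; simp at hj; omega)
      (by simp)
    simp only [if_neg hge]
    rw [hA, hB]
    simp
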